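-- pv_equiv track=rewrite | github.com/pavdemesh/codewars_kata | 6_kyu_longest_consec_str.py | longest_consec
-- ===== SOURCE A (Python) =====
-- def longest_consec(strarr, k):
--     # Declare n to store length of the array
--     n = len(strarr)
--     # Basic check if empty array or k too big or too small
--     if n == 0 or k > n or k <= 0:
--         return ""
--
--     # Variable to store the starting point of the longest sequence
--     longest_start = 0
--     # Variable to store maximum length of the string (will be int)
--     max_length = None
--
--     # Iterate over the array, stopping at item [n - k]
--     # +1 is needed to include the (n-k)th item
--
--     # Enumerate is not optimal since I do not use value
--     # I could be  happy with index and range(len-k+1)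
--     for pos, value in enumerate(strarr[:n - k + 1]):
--         # calculate the len of the string at each starting point
--         length = sum(len(x) for x in strarr[pos:pos + k])
--
--         # If current len is greater than the maximal len
--         # Assign new longest_start position and new maximal length
--         if max_length is None or length > max_length:
--             longest_start = pos
--             max_length = length
--
--     # Return joined items starting from longest_start and including k items
--     return "".join(x for x in strarr[longest_start:longest_start + k])
-- ===== SOURCE B (Python) =====
-- def longest_consec(strarr, k):
--     n = len(strarr)
--     if n == 0 or k > n or k <= 0:
--         return ""
--     lens = [len(s) for s in strarr]
--     window = sum(lens[:k])
--     best = window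
--     best_start = 0
--     for i in range(1, n - k + 1):
--         window += lens[i + k - 1] - lens[i - 1]
--         if window > best:
--             best = window
--             best_start = i
--     return "".join(strarr[best_start:best_start + k])
-- ===== Notes on version B (the rewrite author's own statement) =====
-- stated objective: faster
-- what changed: Replaces the per-position re-summation of k string lengths by a precomputed length list and an O(1) sliding-window update, keeping the first maximal window.
import Mathlib
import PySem

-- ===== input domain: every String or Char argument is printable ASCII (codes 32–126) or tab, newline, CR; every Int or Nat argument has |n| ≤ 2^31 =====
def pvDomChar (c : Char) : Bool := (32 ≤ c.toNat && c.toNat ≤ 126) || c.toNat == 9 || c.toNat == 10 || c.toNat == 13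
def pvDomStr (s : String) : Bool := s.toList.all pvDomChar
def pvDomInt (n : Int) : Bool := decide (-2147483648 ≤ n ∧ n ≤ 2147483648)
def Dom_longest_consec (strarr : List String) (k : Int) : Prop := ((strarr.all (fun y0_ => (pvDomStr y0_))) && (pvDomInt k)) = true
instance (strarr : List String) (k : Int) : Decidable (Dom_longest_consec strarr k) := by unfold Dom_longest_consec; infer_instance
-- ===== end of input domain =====

-- B replaces A's per-window re-summation of k string lengths by a precomputed length list and an O(1) sliding-window update, keeping the first maximal window.

-- ===== PORT A =====
def longest_consec (strarr : List String) (k : Int) : String :=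
  let n : Int := strarr.length
  if n = 0 ∨ k > n ∨ k ≤ 0 then "" else
    let st := (PySem.List.enumerate (PySem.List.slice strarr none (some (n - k + 1)))).foldl
      (fun (st : Int × Option Int) (pv : Int × String) =>
        let length := ((PySem.List.slice strarr (some pv.1) (some (pv.1 + k))).map PySem.Str.len).sum
        match st.2 with
        | none => (pv.1, some length)
        | some m => if length > m then (pv.1, some length) else st)
      (0, none)
    PySem.Str.join "" (PySem.List.slice strarr (some st.1) (some (st.1 + k)))

-- ===== PORT B =====
def longest_consec_alt (strarr : List String) (k : Int) : String :=
  let n : Int := strarr.length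
  if n = 0 ∨ k > n ∨ k ≤ 0 then "" else
    let lens := strarr.map PySem.Str.len
    let window0 := (PySem.List.slice lens none (some k)).sum
    let st := (PySem.List.pyRange 1 (n - k + 1) 1).foldl
      (fun (st : Int × Int × Int) i =>
        let w := st.1 + PySem.List.pyGetD lens (i + k - 1) 0 - PySem.List.pyGetD lens (i - 1) 0
        if w > st.2.1 then (w, w, i) else (w, st.2.1, st.2.2))
      (window0, window0, 0)
    PySem.Str.join "" (PySem.List.slice strarr (some st.2.2) (some (st.2.2 + k)))

-- ===== PRECONDITION & SPEC =====
def Spec_longest_consec (strarr : List String) (k : Int) (out : String) : Prop := out = longest_consec_alt strarr k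
instance (strarr : List String) (k : Int) (out : String) : Decidable (Spec_longest_consec strarr k out) := by unfold Spec_longest_consec; infer_instance

-- ===== CLAIM (what is proved, stated in full; the proofs are below) =====
def Claim_equal_longest_consec : Prop := ∀ (strarr : List String) (k : Int), Dom_longest_consec strarr k → Spec_longest_consec strarr k (longest_consec strarr k)

-- ===== LEMMAS AND PROOFS =====

-- sum of the K entries of lens starting at j (0 beyond the end, matching take/getD)
def pvS (lens : List Int) (K j : Nat) : Int := ∑ t ∈ Finset.range K, lens.getD (j + t) 0

-- A's loop body, with the window sum expressed through pvS
def pvStepA (lens : List Int) (K : Nat) (st : Int × Option Int) (pos : Int) : Int × Option Int :=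
  match st.2 with
  | none => (pos, some (pvS lens K pos.toNat))
  | some m => if pvS lens K pos.toNat > m then (pos, some (pvS lens K pos.toNat)) else st

-- B's loop body (literally the fold function of the port)
def pvStepB (lens : List Int) (k : Int) (st : Int × Int × Int) (i : Int) : Int × Int × Int :=
  let w := st.1 + PySem.List.pyGetD lens (i + k - 1) 0 - PySem.List.pyGetD lens (i - 1) 0
  if w > st.2.1 then (w, w, i) else (w, st.2.1, st.2.2)

lemma pv_sum_take (xs : List Int) (K : Nat) :
    (xs.take K).sum = ∑ t ∈ Finset.range K, xs.getD t 0 := by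
  induction K with
  | zero => simp
  | succ K ih =>
    rw [List.take_add_one, List.sum_append, Finset.sum_range_succ, ih]
    cases h : xs[K]? <;> simp [List.getD, h]

lemma pv_sum_drop_take (lens : List Int) (K j : Nat) :
    ((lens.drop j).take K).sum = pvS lens K j := by
  rw [pv_sum_take, pvS]
  refine Finset.sum_congr rfl fun t _ => ?_
  simp [List.getD_eq_getElem?_getD, List.getElem?_drop]

lemma pv_telescope (lens : List Int) (K j : Nat) (hj : 1 ≤ j) :
    pvS lens K j = pvS lens K (j - 1) + lens.getD (j - 1 + K) 0 - lens.getD (j - 1) 0 := by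
  obtain ⟨j', rfl⟩ : ∃ j', j = j' + 1 := ⟨j - 1, by omega⟩
  simp only [Nat.add_sub_cancel, pvS]
  have h1 : ∑ t ∈ Finset.range K, lens.getD (j' + 1 + t) 0
      = ∑ t ∈ Finset.range (K + 1), lens.getD (j' + t) 0 - lens.getD j' 0 := by
    rw [Finset.sum_range_succ']
    have h2 : ∑ t ∈ Finset.range K, lens.getD (j' + (t + 1)) 0
        = ∑ t ∈ Finset.range K, lens.getD (j' + 1 + t) 0 :=
      Finset.sum_congr rfl fun t _ => by rw [show j' + (t + 1) = j' + 1 + t by omega]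
    rw [h2, show j' + 0 = j' from rfl]
    omega
  rw [h1, Finset.sum_range_succ]

lemma pv_loop (lens : List Int) (K : Nat) (k b : Int) (hk : k = (K : Int)) :
    ∀ (a : Int), 1 ≤ a → ∀ (s0 m0 : Int),
      ((PySem.List.pyRange a b 1).foldl (pvStepA lens K) (s0, some m0)).1
        = ((PySem.List.pyRange a b 1).foldl (pvStepB lens k) (pvS lens K (a - 1).toNat, m0, s0)).2.2
    ∧ ((PySem.List.pyRange a b 1).foldl (pvStepA lens K) (s0, some m0)).2
        = some ((PySem.List.pyRange a b 1).foldl (pvStepB lens k) (pvS lens K (a - 1).toNat, m0, s0)).2.1 := by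
  intro a ha s0 m0
  generalize hN : (b - a).toNat = N
  induction N generalizing a s0 m0 with
  | zero =>
    rw [PySem.List.pyRange_one_eq_nil (by omega)]
    exact ⟨rfl, rfl⟩
  | succ N ih =>
    rw [PySem.List.pyRange_one_cons (by omega)]
    simp only [List.foldl_cons]
    have hw : pvS lens K (a - 1).toNat + PySem.List.pyGetD lens (a + k - 1) 0
        - PySem.List.pyGetD lens (a - 1) 0 = pvS lens K a.toNat := by
      have h1 : a + k - 1 = ((a.toNat - 1 + K : Nat) : Int) := by
        subst hk; omega
      have h2 : a - 1 = ((a.toNat - 1 : Nat) : Int) := by omega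
      have h3 : (a - 1).toNat = a.toNat - 1 := by omega
      rw [h3, h1, h2, PySem.List.pyGetD_natCast, PySem.List.pyGetD_natCast]
      exact (pv_telescope lens K a.toNat (by omega)).symm
    have hstepA : pvStepA lens K (s0, some m0) a
        = if pvS lens K a.toNat > m0 then (a, some (pvS lens K a.toNat)) else (s0, some m0) := rfl
    have hstepB : pvStepB lens k (pvS lens K (a - 1).toNat, m0, s0) a
        = if pvS lens K a.toNat > m0 then (pvS lens K a.toNat, pvS lens K a.toNat, a)
          else (pvS lens K a.toNat, m0, s0) := by
      simp only [pvStepB, hw]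
    rw [hstepA, hstepB]
    have ha1 : (a + 1 - 1).toNat = a.toNat := by omega
    by_cases hc : pvS lens K a.toNat > m0
    · simp only [if_pos hc]
      have := ih (a + 1) (by omega) a (pvS lens K a.toNat) (by omega)
      rwa [ha1] at this
    · simp only [if_neg hc]
      have := ih (a + 1) (by omega) s0 m0 (by omega)
      rwa [ha1] at this

-- ===== VERDICT (by name: the statement is the Claim_ definition above) =====
theorem longest_consec_spec : Claim_equal_longest_consec := by
  intro strarr k _
  unfold Spec_longest_consec longest_consec longest_consec_alt
  dsimp only
  by_cases hg : (strarr.length : Int) = 0 ∨ k > (strarr.length : Int) ∨ k ≤ 0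
  · rw [if_pos hg, if_pos hg]
  · rw [if_neg hg, if_neg hg]
    simp only [not_or, not_lt, not_le] at hg
    obtain ⟨hn, hkn, hk0⟩ := hg
    have hkK : k = (k.toNat : Int) := by omega
    -- A's loop as a fold of pvStepA over the position range
    have hA : (PySem.List.enumerate (PySem.List.slice strarr none (some ((strarr.length : Int) - k + 1)))).foldl
        (fun (st : Int × Option Int) (pv : Int × String) =>
          let length := ((PySem.List.slice strarr (some pv.1) (some (pv.1 + k))).map PySem.Str.len).sum
          match st.2 with
          | none => (pv.1, some length)
          | some m => if length > m then (pv.1, some length) else st)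
        (0, none)
        = (PySem.List.pyRange 0 ((strarr.length : Int) - k + 1) 1).foldl
            (pvStepA (strarr.map PySem.Str.len) k.toNat) (0, none) := by
      rw [PySem.List.slice_to strarr (by omega)]
      rw [PySem.List.enumerate_eq_map_pyRange _ ""]
      rw [List.foldl_map]
      have hlen : PySem.List.len (List.take (((strarr.length : Int) - k + 1)).toNat strarr)
          = (strarr.length : Int) - k + 1 := by
        rw [PySem.List.len_eq]
        simp
        omega
      rw [hlen]
      apply PySem.List.foldl_congr_mem
      intro acc pos hmem
      obtain ⟨hpos0, hposM⟩ := PySem.List.mem_pyRange_one.mp hmem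
      have hslice : ((PySem.List.slice strarr (some pos) (some (pos + k))).map PySem.Str.len).sum
          = pvS (strarr.map PySem.Str.len) k.toNat pos.toNat := by
        rw [PySem.List.slice_toNat strarr hpos0 (by omega)]
        have h4 : (pos + k).toNat - pos.toNat = k.toNat := by omega
        rw [h4, List.map_take, List.map_drop, pv_sum_drop_take]
      obtain ⟨s, mo⟩ := acc
      cases mo <;> simp only [pvStepA, hslice]
    rw [hA]
    have hw0 : (PySem.List.slice (strarr.map PySem.Str.len) none (some k)).sum
        = pvS (strarr.map PySem.Str.len) k.toNat 0 := by
      rw [PySem.List.slice_to _ (by omega)]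
      have := pv_sum_drop_take (strarr.map PySem.Str.len) k.toNat 0
      rwa [List.drop_zero] at this
    rw [hw0]
    rw [show (fun (st : Int × Int × Int) (i : Int) =>
          let w := st.1 + PySem.List.pyGetD (strarr.map PySem.Str.len) (i + k - 1) 0
            - PySem.List.pyGetD (strarr.map PySem.Str.len) (i - 1) 0
          if w > st.2.1 then (w, w, i) else (w, st.2.1, st.2.2))
        = pvStepB (strarr.map PySem.Str.len) k from rfl]
    rw [PySem.List.pyRange_one_cons (show (0 : Int) < (strarr.length : Int) - k + 1 by omega),
      List.foldl_cons, show (0 : Int) + 1 = 1 by norm_num]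
    rw [show pvStepA (strarr.map PySem.Str.len) k.toNat (0, none) 0
        = (0, some (pvS (strarr.map PySem.Str.len) k.toNat 0)) from rfl]
    have key := (pv_loop (strarr.map PySem.Str.len) k.toNat k ((strarr.length : Int) - k + 1) hkK
      1 (by omega) 0 (pvS (strarr.map PySem.Str.len) k.toNat 0)).1
    rw [show ((1 : Int) - 1).toNat = 0 from rfl] at key
    rw [key]
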